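-- pv_equiv track=rewrite | github.com/VantaTree/AdventOfCode2023 | days/d12/sol.py | calc_contagious_grps
-- ===== SOURCE A (Python) =====
-- def calc_contagious_grps(rec, assume_question_as_working=True):
--     seq = [0]
--     in_grp = False
--     for ch in rec:
--         if ch == "." or (ch == "?" if assume_question_as_working else 0):
--             if in_grp:
--                 seq.append(0)
--             in_grp = False
--         else:
--             seq[-1] += 1
--             in_grp = True
--     return (seq[:-1] if seq[-1] == 0 else seq)
-- ===== SOURCE B (Python) =====
-- def calc_contagious_grps(rec, assume_question_as_working=True):
--     # Two-pointer scan: skip separator chars, then measure each maximal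
--     # run of non-separator (damaged) chars in one inner advance.
--     seps = ".?" if assume_question_as_working else "."
--     out = []
--     i = 0
--     n = len(rec)
--     while i < n:
--         if rec[i] in seps:
--             i += 1
--         else:
--             j = i + 1
--             while j < n and rec[j] not in seps:
--                 j += 1
--             out.append(j - i)
--             i = j
--     return out
-- ===== Notes on version B (the rewrite author's own statement) =====
-- stated objective: alternative
-- what changed: Replaces A's per-char flag fold (in_grp bookkeeping, growing a seq list and trimming a trailing zero) with a two-pointer scan that skips separators and measures each maximal damaged run directly, appending its length once.
import Mathlib
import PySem

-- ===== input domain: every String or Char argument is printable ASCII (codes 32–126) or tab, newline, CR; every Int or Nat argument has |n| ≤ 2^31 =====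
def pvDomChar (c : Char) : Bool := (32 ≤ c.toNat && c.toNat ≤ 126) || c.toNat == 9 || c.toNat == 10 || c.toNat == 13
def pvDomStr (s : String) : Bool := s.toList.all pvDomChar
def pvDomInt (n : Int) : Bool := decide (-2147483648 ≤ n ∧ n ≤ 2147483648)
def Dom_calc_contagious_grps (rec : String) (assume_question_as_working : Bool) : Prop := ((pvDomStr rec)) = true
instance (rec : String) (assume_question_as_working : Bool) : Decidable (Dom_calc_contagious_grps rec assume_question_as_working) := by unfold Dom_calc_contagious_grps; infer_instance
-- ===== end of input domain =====

-- B replaces A's in_grp-flag fold (with trailing-zero cleanup) by a two-pointer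
-- skip-separator / measure-run scan; objective: alternative decomposition.

-- ===== PORT A =====
-- seq is kept in REVERSED order: Python's `seq[-1] += 1` is a head increment,
-- `seq.append(0)` is `0 :: ·`; pvFinishA is `seq[:-1] if seq[-1] == 0 else seq`
-- (plus the final un-reversal). Same values, step for step.
def pvAStep (q : Bool) (st : List Int × Bool) (ch : Char) : List Int × Bool :=
  if ch == '.' || (if q then ch == '?' else false) then
    (if st.2 then 0 :: st.1 else st.1, false)
  else
    ((match st.1 with
      | [] => []        -- unreachable: seq starts nonempty and never shrinks
      | h :: t => (h + 1) :: t), true)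

def pvFinishA (s : List Int) : List Int :=
  if s.head? == some 0 then s.tail.reverse else s.reverse

def calc_contagious_grps (rec : String) (assume_question_as_working : Bool) : List Int :=
  pvFinishA (rec.toList.foldl (pvAStep assume_question_as_working) ([0], false)).1

-- ===== PORT B =====
-- `ch in seps` with seps = ".?" or "."
def pvSep (q : Bool) (c : Char) : Bool :=
  if q then c == '.' || c == '?' else c == '.'

-- the outer while loop of Source B; the inner while (advance j over the run)
-- is takeWhile/dropWhile of the non-separator predicate
def pvAltGo (q : Bool) : List Char → List Int
  | [] => []
  | c :: cs =>
    if pvSep q c then pvAltGo q cs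
    else ((cs.takeWhile (fun d => !pvSep q d)).length + 1 : Int) ::
         pvAltGo q (cs.dropWhile (fun d => !pvSep q d))
  termination_by cs => cs.length
  decreasing_by
    · simp
    · exact Nat.lt_succ_of_le (List.length_dropWhile_le _ _)

def calc_contagious_grps_alt (rec : String) (assume_question_as_working : Bool) : List Int :=
  pvAltGo assume_question_as_working rec.toList

-- ===== PRECONDITION & SPEC =====
def Spec_calc_contagious_grps (rec : String) (assume_question_as_working : Bool) (out : List Int) : Prop := out = calc_contagious_grps_alt rec assume_question_as_working
instance (rec : String) (assume_question_as_working : Bool) (out : List Int) : Decidable (Spec_calc_contagious_grps rec assume_question_as_working out) := by unfold Spec_calc_contagious_grps; infer_instance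

-- ===== CLAIM (what is proved, stated in full; the proofs are below) =====
def Claim_equal_calc_contagious_grps : Prop := ∀ (rec : String) (assume_question_as_working : Bool), Dom_calc_contagious_grps rec assume_question_as_working → Spec_calc_contagious_grps rec assume_question_as_working (calc_contagious_grps rec assume_question_as_working)

-- ===== LEMMAS AND PROOFS =====

-- A's branch condition is the separator test
theorem pvCond_eq (q : Bool) (c : Char) :
    (c == '.' || (if q then c == '?' else false)) = pvSep q c := by
  cases q <;> simp [pvSep]

-- loop invariant: from a fresh state (head 0, not in a group) the fold yields
-- B's run list; mid-run (head h > 0, in a group) it first finishes the run.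
theorem pvKey (q : Bool) (cs : List Char) :
    (∀ t : List Int,
      pvFinishA ((cs.foldl (pvAStep q) (0 :: t, false)).1)
        = t.reverse ++ pvAltGo q cs) ∧
    (∀ (t : List Int) (h : Int), 0 < h →
      pvFinishA ((cs.foldl (pvAStep q) (h :: t, true)).1)
        = t.reverse ++ (((cs.takeWhile (fun d => !pvSep q d)).length : Int) + h)
            :: pvAltGo q (cs.dropWhile (fun d => !pvSep q d))) := by
  induction cs with
  | nil =>
    constructor
    · intro t; simp [pvFinishA, pvAltGo]
    · intro t h hh
      have : (some h == some (0 : Int)) = false := by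
        simp; omega
      simp [pvFinishA, this, pvAltGo]
  | cons c cs ih =>
    obtain ⟨ih1, ih2⟩ := ih
    constructor
    · intro t
      by_cases hp : pvSep q c = true
      · have hc : (c == '.' || (if q then c == '?' else false)) = true := by
          rw [pvCond_eq]; exact hp
        simp only [List.foldl_cons, pvAStep, hc, if_true]
        simpa [pvAltGo, hp] using ih1 t
      · have hc : (c == '.' || (if q then c == '?' else false)) = false := by
          rw [pvCond_eq]; simpa using hp
        simp only [List.foldl_cons, pvAStep, hc, Bool.false_eq_true, if_false]
        have := ih2 t 1 one_pos
        simp only [show (0 : Int) + 1 = 1 from rfl] at *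
        rw [this]
        simp [pvAltGo, hp]
    · intro t h hh
      by_cases hp : pvSep q c = true
      · have hc : (c == '.' || (if q then c == '?' else false)) = true := by
          rw [pvCond_eq]; exact hp
        simp only [List.foldl_cons, pvAStep, hc, if_true]
        rw [ih1 (h :: t)]
        simp [pvAltGo, hp, List.takeWhile, List.dropWhile]
      · have hc : (c == '.' || (if q then c == '?' else false)) = false := by
          rw [pvCond_eq]; simpa using hp
        simp only [List.foldl_cons, pvAStep, hc, Bool.false_eq_true, if_false]
        rw [ih2 t (h + 1) (by omega)]
        have ht : (c :: cs).takeWhile (fun d => !pvSep q d) = c :: cs.takeWhile (fun d => !pvSep q d) := by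
          simp [List.takeWhile, hp]
        have hd : (c :: cs).dropWhile (fun d => !pvSep q d) = cs.dropWhile (fun d => !pvSep q d) := by
          simp [List.dropWhile, hp]
        rw [ht, hd]
        congr 1
        congr 1
        simp only [List.length_cons]
        push_cast
        ring

-- ===== VERDICT (by name: the statement is the Claim_ definition above) =====
theorem calc_contagious_grps_spec : Claim_equal_calc_contagious_grps := by
  intro rec q _
  unfold Spec_calc_contagious_grps calc_contagious_grps calc_contagious_grps_alt
  simpa using (pvKey q rec.toList).1 []
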